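-- pv_equiv track=rewrite | github.com/tusharsharma20021114-rgb/butler | scripts/daily-planner.py | categorize_eisenhower
-- ===== SOURCE A (Python) =====
-- def categorize_eisenhower(tasks):
--     """Categorize tasks using the Eisenhower Matrix."""
--     quadrants = {
--         "🔥 DO FIRST (Urgent + Important)": [],
--         "📅 SCHEDULE (Important, Not Urgent)": [],
--         "👤 DELEGATE (Urgent, Not Important)": [],
--         "🗑️ ELIMINATE (Neither)": [],
--     }
--     for desc, priority in tasks:
--         if priority == "high":
--             quadrants["🔥 DO FIRST (Urgent + Important)"].append(desc)
--         elif priority == "medium":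
--             quadrants["📅 SCHEDULE (Important, Not Urgent)"].append(desc)
--         elif priority == "low":
--             quadrants["👤 DELEGATE (Urgent, Not Important)"].append(desc)
--         else:
--             quadrants["🗑️ ELIMINATE (Neither)"].append(desc)
--     return quadrants
-- ===== SOURCE B (Python) =====
-- def categorize_eisenhower(tasks):
--     """Categorize tasks using the Eisenhower Matrix."""
--     return {
--         "🔥 DO FIRST (Urgent + Important)": [d for d, p in tasks if p == "high"],
--         "📅 SCHEDULE (Important, Not Urgent)": [d for d, p in tasks if p == "medium"],
--         "👤 DELEGATE (Urgent, Not Important)": [d for d, p in tasks if p == "low"],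
--         "🗑️ ELIMINATE (Neither)": [d for d, p in tasks if p not in ("high", "medium", "low")],
--     }
-- ===== Notes on version B (the rewrite author's own statement) =====
-- stated objective: idiomatic
-- what changed: Replaces the single accumulating loop over a mutable dict with a dict literal of four list comprehensions, one filter pass per quadrant.
import Mathlib
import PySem

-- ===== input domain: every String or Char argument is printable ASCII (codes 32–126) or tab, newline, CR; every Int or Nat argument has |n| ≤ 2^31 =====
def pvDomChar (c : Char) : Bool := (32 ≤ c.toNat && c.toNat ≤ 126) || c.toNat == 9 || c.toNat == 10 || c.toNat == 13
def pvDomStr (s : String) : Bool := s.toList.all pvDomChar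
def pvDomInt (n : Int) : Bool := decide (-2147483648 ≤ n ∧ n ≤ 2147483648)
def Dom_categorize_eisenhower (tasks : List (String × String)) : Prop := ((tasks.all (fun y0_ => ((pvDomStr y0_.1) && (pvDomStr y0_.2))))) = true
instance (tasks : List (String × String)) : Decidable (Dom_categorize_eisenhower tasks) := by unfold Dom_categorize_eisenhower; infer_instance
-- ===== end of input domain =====

-- B replaces A's single accumulating loop over a mutable dict by four independent filter passes, one per quadrant (idiomatic; same cost).


-- ===== PORT A =====
def categorize_eisenhower (tasks : List (String × String)) : List (String × List String) :=
  let quadrants : PySem.Dict String (List String) :=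
    PySem.Dict.ofList [("🔥 DO FIRST (Urgent + Important)", []),
                       ("📅 SCHEDULE (Important, Not Urgent)", []),
                       ("👤 DELEGATE (Urgent, Not Important)", []),
                       ("🗑️ ELIMINATE (Neither)", [])]
  let final := tasks.foldl (fun d t =>
    let desc := t.1
    let priority := t.2
    if priority == "high" then
      d.modify "🔥 DO FIRST (Urgent + Important)" [] (fun l => l ++ [desc])
    else if priority == "medium" then
      d.modify "📅 SCHEDULE (Important, Not Urgent)" [] (fun l => l ++ [desc])
    else if priority == "low" then
      d.modify "👤 DELEGATE (Urgent, Not Important)" [] (fun l => l ++ [desc])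
    else
      d.modify "🗑️ ELIMINATE (Neither)" [] (fun l => l ++ [desc])) quadrants
  final.items

-- ===== PORT B =====
def categorize_eisenhower_alt (tasks : List (String × String)) : List (String × List String) :=
  [("🔥 DO FIRST (Urgent + Important)", (tasks.filter (fun t => t.2 == "high")).map (·.1)),
   ("📅 SCHEDULE (Important, Not Urgent)", (tasks.filter (fun t => t.2 == "medium")).map (·.1)),
   ("👤 DELEGATE (Urgent, Not Important)", (tasks.filter (fun t => t.2 == "low")).map (·.1)),
   ("🗑️ ELIMINATE (Neither)", (tasks.filter (fun t => !(t.2 == "high" || t.2 == "medium" || t.2 == "low"))).map (·.1))]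

-- ===== PRECONDITION & SPEC =====
def Spec_categorize_eisenhower (tasks : List (String × String)) (out : List (String × List String)) : Prop := out = categorize_eisenhower_alt tasks
instance (tasks : List (String × String)) (out : List (String × List String)) : Decidable (Spec_categorize_eisenhower tasks out) := by unfold Spec_categorize_eisenhower; infer_instance

-- ===== CLAIM (what is proved, stated in full; the proofs are below) =====
def Claim_equal_categorize_eisenhower : Prop := ∀ (tasks : List (String × String)), Dom_categorize_eisenhower tasks → Spec_categorize_eisenhower tasks (categorize_eisenhower tasks)

-- ===== LEMMAS AND PROOFS =====

lemma loop_items (ts : List (String × String)) (a b c e : List String) :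
    (ts.foldl (fun d (t : String × String) =>
      let desc := t.1
      let priority := t.2
      if priority == "high" then
        d.modify "🔥 DO FIRST (Urgent + Important)" [] (fun l => l ++ [desc])
      else if priority == "medium" then
        d.modify "📅 SCHEDULE (Important, Not Urgent)" [] (fun l => l ++ [desc])
      else if priority == "low" then
        d.modify "👤 DELEGATE (Urgent, Not Important)" [] (fun l => l ++ [desc])
      else
        d.modify "🗑️ ELIMINATE (Neither)" [] (fun l => l ++ [desc]))
      (PySem.Dict.mk [("🔥 DO FIRST (Urgent + Important)", a),
                      ("📅 SCHEDULE (Important, Not Urgent)", b),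
                      ("👤 DELEGATE (Urgent, Not Important)", c),
                      ("🗑️ ELIMINATE (Neither)", e)])).items
    = [("🔥 DO FIRST (Urgent + Important)", a ++ (ts.filter (fun t => t.2 == "high")).map (·.1)),
       ("📅 SCHEDULE (Important, Not Urgent)", b ++ (ts.filter (fun t => t.2 == "medium")).map (·.1)),
       ("👤 DELEGATE (Urgent, Not Important)", c ++ (ts.filter (fun t => t.2 == "low")).map (·.1)),
       ("🗑️ ELIMINATE (Neither)", e ++ (ts.filter (fun t => !(t.2 == "high" || t.2 == "medium" || t.2 == "low"))).map (·.1))] := by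
  induction ts generalizing a b c e with
  | nil => simp
  | cons t ts ih =>
    simp only [List.foldl_cons]
    by_cases h1 : t.2 = "high"
    · rw [h1]
      rw [show (PySem.Dict.modify (PySem.Dict.mk [("🔥 DO FIRST (Urgent + Important)", a),
            ("📅 SCHEDULE (Important, Not Urgent)", b), ("👤 DELEGATE (Urgent, Not Important)", c),
            ("🗑️ ELIMINATE (Neither)", e)]) "🔥 DO FIRST (Urgent + Important)" [] (fun l => l ++ [t.1]))
          = PySem.Dict.mk [("🔥 DO FIRST (Urgent + Important)", a ++ [t.1]),
            ("📅 SCHEDULE (Important, Not Urgent)", b), ("👤 DELEGATE (Urgent, Not Important)", c),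
            ("🗑️ ELIMINATE (Neither)", e)] from by
        simp [PySem.Dict.modify, PySem.Dict.contains, PySem.Dict.insert, PySem.Dict.getD, PySem.Dict.get?_mk_cons]]
      rw [if_pos (by decide), ih]
      simp [h1]
    · by_cases h2 : t.2 = "medium"
      · rw [h2]
        rw [show (PySem.Dict.modify (PySem.Dict.mk [("🔥 DO FIRST (Urgent + Important)", a),
              ("📅 SCHEDULE (Important, Not Urgent)", b), ("👤 DELEGATE (Urgent, Not Important)", c),
              ("🗑️ ELIMINATE (Neither)", e)]) "📅 SCHEDULE (Important, Not Urgent)" [] (fun l => l ++ [t.1]))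
            = PySem.Dict.mk [("🔥 DO FIRST (Urgent + Important)", a),
              ("📅 SCHEDULE (Important, Not Urgent)", b ++ [t.1]), ("👤 DELEGATE (Urgent, Not Important)", c),
              ("🗑️ ELIMINATE (Neither)", e)] from by
          simp [PySem.Dict.modify, PySem.Dict.contains, PySem.Dict.insert, PySem.Dict.getD, PySem.Dict.get?_mk_cons]]
        have hb1 : (("medium" : String) == "high") = false := by decide
        rw [if_neg (by simp), if_pos (by decide), ih]
        simp [h2]
      · by_cases h3 : t.2 = "low"
        · rw [h3]
          rw [show (PySem.Dict.modify (PySem.Dict.mk [("🔥 DO FIRST (Urgent + Important)", a),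
                ("📅 SCHEDULE (Important, Not Urgent)", b), ("👤 DELEGATE (Urgent, Not Important)", c),
                ("🗑️ ELIMINATE (Neither)", e)]) "👤 DELEGATE (Urgent, Not Important)" [] (fun l => l ++ [t.1]))
              = PySem.Dict.mk [("🔥 DO FIRST (Urgent + Important)", a),
                ("📅 SCHEDULE (Important, Not Urgent)", b), ("👤 DELEGATE (Urgent, Not Important)", c ++ [t.1]),
                ("🗑️ ELIMINATE (Neither)", e)] from by
            simp [PySem.Dict.modify, PySem.Dict.contains, PySem.Dict.insert, PySem.Dict.getD, PySem.Dict.get?_mk_cons]]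
          rw [if_neg (by simp), if_neg (by simp), if_pos (by decide), ih]
          simp [h3]
        · have hb1 : (t.2 == "high") = false := by simp [h1]
          have hb2 : (t.2 == "medium") = false := by simp [h2]
          have hb3 : (t.2 == "low") = false := by simp [h3]
          rw [if_neg (by simp [hb1]), if_neg (by simp [hb2]), if_neg (by simp [hb3])]
          rw [show (PySem.Dict.modify (PySem.Dict.mk [("🔥 DO FIRST (Urgent + Important)", a),
                ("📅 SCHEDULE (Important, Not Urgent)", b), ("👤 DELEGATE (Urgent, Not Important)", c),
                ("🗑️ ELIMINATE (Neither)", e)]) "🗑️ ELIMINATE (Neither)" [] (fun l => l ++ [t.1]))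
              = PySem.Dict.mk [("🔥 DO FIRST (Urgent + Important)", a),
                ("📅 SCHEDULE (Important, Not Urgent)", b), ("👤 DELEGATE (Urgent, Not Important)", c),
                ("🗑️ ELIMINATE (Neither)", e ++ [t.1])] from by
            simp [PySem.Dict.modify, PySem.Dict.contains, PySem.Dict.insert, PySem.Dict.getD, PySem.Dict.get?_mk_cons]]
          rw [ih]
          simp [h1, h2, h3]

-- ===== VERDICT (by name: the statement is the Claim_ definition above) =====
theorem categorize_eisenhower_spec : Claim_equal_categorize_eisenhower := by
  intro tasks _
  show categorize_eisenhower tasks = categorize_eisenhower_alt tasks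
  unfold categorize_eisenhower categorize_eisenhower_alt
  simp only [PySem.Dict.ofList]
  rw [show PySem.Dict.update PySem.Dict.empty [("🔥 DO FIRST (Urgent + Important)", ([] : List String)),
        ("📅 SCHEDULE (Important, Not Urgent)", []), ("👤 DELEGATE (Urgent, Not Important)", []),
        ("🗑️ ELIMINATE (Neither)", [])]
      = PySem.Dict.mk [("🔥 DO FIRST (Urgent + Important)", []),
        ("📅 SCHEDULE (Important, Not Urgent)", []), ("👤 DELEGATE (Urgent, Not Important)", []),
        ("🗑️ ELIMINATE (Neither)", [])] from by decide]
  rw [loop_items]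
  simp
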